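-- pv_equiv track=rewrite | github.com/gourav-sharma1857/cipher-spry-backend | patterns.py | vowel_boost_shift
-- ===== SOURCE A (Python) =====
-- MOD_26 = 26 # Constant for modulo 26, used for wrapping around the alphabet (A-Z)
--
-- ASCII_A_UPPER = ord('A') # ASCII value of 'A' (65), used as a base for character-to-index conversion
--
-- VOWELS = "AEIOU" # String of uppercase vowels
--
-- def is_vowel(char: str) -> bool: # Function to check if a character is a vowel
--     return char.upper() in VOWELS # Convert char to uppercase and check if it's in the VOWELS string
--
-- def is_consonant(char: str) -> bool: # Function to check if a character is a consonant
--     return char.isalpha() and not is_vowel(char) # Check if it's an alphabet character AND not a vowel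
--
-- def shift_char(char: str, shift: int) -> str: # Function to shift a character by a given amount (Caesar cipher style)
--     if 'A' <= char <= 'Z': # Check if the character is an uppercase letter
--         # Convert char to 0-25 index, add shift, apply modulo 26, handle negative results, convert back to ASCII char
--         return chr(((ord(char) - ASCII_A_UPPER + shift) % MOD_26 + MOD_26) % MOD_26 + ASCII_A_UPPER)
--     return char # Return non-alphabetic characters unchanged
--
-- def vowel_boost_shift(word: str) -> str: # Pattern: shifts vowels by a larger amount, consonants by a smaller amount
--     transformed = [] # Initialize an empty list
--     for char in word: # Iterate through each character
--         if is_vowel(char): # If it's a vowel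
--             transformed.append(shift_char(char, 5)) # Shift vowels forward by 5
--         elif is_consonant(char): # If it's a consonant
--             transformed.append(shift_char(char, 1)) # Shift consonants forward by 1
--         else: # If not a letter, append unchanged
--             transformed.append(char)
--     return "".join(transformed) # Join the list of characters
-- ===== SOURCE B (Python) =====
-- _TABLE = str.maketrans({
--     L: chr((ord(L) - ord('A') + (5 if L in "AEIOU" else 1)) % 26 + ord('A'))
--     for L in "ABCDEFGHIJKLMNOPQRSTUVWXYZ"
-- })
--
-- def vowel_boost_shift(word: str) -> str:
--     return word.translate(_TABLE)
-- ===== Notes on version B (the rewrite author's own statement) =====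
-- stated objective: idiomatic
-- what changed: Replaces the per-character classify-and-shift loop with a 26-entry translation table built once over the uppercase alphabet and applied via str.translate; only uppercase letters are in the table, so everything else passes through unchanged.
import Mathlib
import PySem

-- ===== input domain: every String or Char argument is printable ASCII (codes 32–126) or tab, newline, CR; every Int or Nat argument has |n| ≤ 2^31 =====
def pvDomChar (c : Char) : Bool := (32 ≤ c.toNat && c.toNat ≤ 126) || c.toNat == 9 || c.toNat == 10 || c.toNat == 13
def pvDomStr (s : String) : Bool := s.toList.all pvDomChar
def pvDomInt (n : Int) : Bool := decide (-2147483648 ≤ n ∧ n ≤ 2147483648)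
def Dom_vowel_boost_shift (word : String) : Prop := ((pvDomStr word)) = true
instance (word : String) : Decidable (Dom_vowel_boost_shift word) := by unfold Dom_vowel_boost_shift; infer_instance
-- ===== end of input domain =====

-- B replaces A's per-character classify-and-shift branching with a 26-entry
-- translation table built once and looked up per character (idiomatic rewrite).


-- ===== PORT A =====
-- char.upper() for a single char (exact on the ASCII domain)
def pvUpper (c : Char) : Char :=
  if 'a' ≤ c ∧ c ≤ 'z' then Char.ofNat (c.toNat - 32) else c

def is_vowel (c : Char) : Bool := "AEIOU".toList.contains (pvUpper c)

-- char.isalpha() (exact on the ASCII domain) and not is_vowel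
def is_consonant (c : Char) : Bool :=
  (('A' ≤ c ∧ c ≤ 'Z') ∨ ('a' ≤ c ∧ c ≤ 'z') : Bool) && !(is_vowel c)

def shift_char (c : Char) (shift : Int) : Char :=
  if 'A' ≤ c ∧ c ≤ 'Z' then
    Char.ofNat ((((((c.toNat : Int) - 65 + shift) % 26 + 26) % 26 + 65)).toNat)
  else c

def vowel_boost_shift (word : String) : String :=
  String.ofList (word.toList.foldl (fun acc c =>
    acc ++ [if is_vowel c then shift_char c 5
            else if is_consonant c then shift_char c 1
            else c]) [])

-- ===== PORT B =====
-- the translation table: each uppercase letter mapped to its shifted image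
def pvTable : PySem.Dict Char Char :=
  PySem.Dict.ofList ("ABCDEFGHIJKLMNOPQRSTUVWXYZ".toList.map (fun L =>
    (L, Char.ofNat ((L.toNat - 65 + (if "AEIOU".toList.contains L then 5 else 1)) % 26 + 65))))

def vowel_boost_shift_alt (word : String) : String :=
  String.ofList (word.toList.map (fun c => (PySem.Dict.get? pvTable c).getD c))

-- ===== PRECONDITION & SPEC =====
def Spec_vowel_boost_shift (word : String) (out : String) : Prop := out = vowel_boost_shift_alt word
instance (word : String) (out : String) : Decidable (Spec_vowel_boost_shift word out) := by unfold Spec_vowel_boost_shift; infer_instance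

-- ===== CLAIM (what is proved, stated in full; the proofs are below) =====
def Claim_equal_vowel_boost_shift : Prop := ∀ (word : String), Dom_vowel_boost_shift word → Spec_vowel_boost_shift word (vowel_boost_shift word)

-- ===== LEMMAS AND PROOFS =====
def stepA (c : Char) : Char :=
  if is_vowel c then shift_char c 5
  else if is_consonant c then shift_char c 1
  else c

def stepB (c : Char) : Char := (PySem.Dict.get? pvTable c).getD c

set_option maxRecDepth 100000 in
set_option maxHeartbeats 1000000 in
theorem step_eq_small : ∀ n : Nat, n < 127 → stepA (Char.ofNat n) = stepB (Char.ofNat n) := by decide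

theorem step_eq (c : Char) (h : pvDomChar c = true) : stepA c = stepB c := by
  have hlt : c.toNat < 127 := by
    simp [pvDomChar] at h
    omega
  have := step_eq_small c.toNat hlt
  rwa [Char.ofNat_toNat] at this

theorem foldl_append_map (f : Char → Char) :
    ∀ (l acc : List Char),
      l.foldl (fun a c => a ++ [f c]) acc = acc ++ l.map f := by
  intro l
  induction l with
  | nil => simp
  | cons c t ih => intro acc; simp [List.foldl, ih]

-- ===== VERDICT (by name: the statement is the Claim_ definition above) =====
theorem vowel_boost_shift_spec : Claim_equal_vowel_boost_shift := by
  intro word hdom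
  unfold Spec_vowel_boost_shift vowel_boost_shift vowel_boost_shift_alt
  have : word.toList.foldl (fun acc c =>
      acc ++ [if is_vowel c then shift_char c 5
              else if is_consonant c then shift_char c 1
              else c]) [] = word.toList.map stepA := by
    simpa [stepA] using foldl_append_map stepA word.toList []
  rw [this]
  congr 1
  apply List.map_congr_left
  intro c hc
  have h : pvDomChar c = true := by
    have := hdom
    unfold Dom_vowel_boost_shift pvDomStr at this
    exact List.all_eq_true.mp this c hc
  exact step_eq c h
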